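-- pv_equiv track=rewrite | github.com/JKHira/sdsl2_coder | references/sdsl2_core/lint_rules_literals.py | _count_square_bracket_delta
-- ===== SOURCE A (Python) =====
-- def _count_square_bracket_delta(line: str) -> tuple[int, bool]:
--     delta = 0
--     has_open = False
--     in_string: str | None = None
--     escape = False
--     for ch in line:
--         if in_string:
--             if escape:
--                 escape = False
--             elif ch == "\\":
--                 escape = True
--             elif ch == in_string:
--                 in_string = None
--             continue
--         if ch in ("\"", "'"):
--             in_string = ch
--             continue
--         if ch == "[":
--             delta += 1
--             has_open = True
--         elif ch == "]":
--             delta -= 1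
--     return delta, has_open
-- ===== SOURCE B (Python) =====
-- def _count_square_bracket_delta(line: str) -> tuple[int, bool]:
--     delta = 0
--     has_open = False
--     i = 0
--     n = len(line)
--     while i < n:
--         ch = line[i]
--         if ch == '"' or ch == "'":
--             # skip the whole string literal with an inner cursor loop
--             i += 1
--             while i < n:
--                 if line[i] == "\\":
--                     i += 2
--                 elif line[i] == ch:
--                     i += 1
--                     break
--                 else:
--                     i += 1
--         else:
--             if ch == "[":
--                 delta += 1
--                 has_open = True
--             elif ch == "]":
--                 delta -= 1
--             i += 1
--     return delta, has_open
-- ===== Notes on version B (the rewrite author's own statement) =====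
-- stated objective: alternative
-- what changed: Replaces A's single for-loop with in_string/escape flag variables by an explicit index cursor: an outer while over positions and, on a quote, an inner while that consumes the whole string literal (skipping two chars on a backslash) before the bracket counting resumes.
import Mathlib
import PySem

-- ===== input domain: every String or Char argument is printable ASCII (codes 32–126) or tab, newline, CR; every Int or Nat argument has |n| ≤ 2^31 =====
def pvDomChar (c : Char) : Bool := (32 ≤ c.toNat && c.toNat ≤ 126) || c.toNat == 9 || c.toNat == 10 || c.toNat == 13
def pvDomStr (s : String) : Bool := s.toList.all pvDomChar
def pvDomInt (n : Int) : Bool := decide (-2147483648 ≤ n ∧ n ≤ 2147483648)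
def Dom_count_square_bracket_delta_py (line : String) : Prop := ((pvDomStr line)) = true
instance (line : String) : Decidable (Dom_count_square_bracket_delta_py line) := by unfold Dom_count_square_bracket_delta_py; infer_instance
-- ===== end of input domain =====

-- B replaces A's flag-variable single loop (in_string/escape state machine) by an explicit
-- cursor scan with an inner literal-skipping loop; objective: alternative decomposition, same cost.


-- ===== PORT A =====
-- state: (delta, has_open, in_string, escape); one step of A's for-loop body
def aStep (s : Int × Bool × Option Char × Bool) (ch : Char) : Int × Bool × Option Char × Bool :=
  match s with
  | (d, hob, ins, esc) =>
    match ins with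
    | some q =>
      if esc then (d, hob, some q, false)
      else if ch = '\\' then (d, hob, some q, true)
      else if ch = q then (d, hob, none, false)
      else (d, hob, some q, esc)
    | none =>
      if ch = '"' ∨ ch = '\'' then (d, hob, some ch, esc)
      else if ch = '[' then (d + 1, true, none, esc)
      else if ch = ']' then (d - 1, hob, none, esc)
      else (d, hob, none, esc)

def count_square_bracket_delta_py (line : String) : Int × Bool :=
  let st := line.toList.foldl aStep (0, false, none, false)
  (st.1, st.2.1)

-- ===== PORT B =====
-- inner cursor loop: skip a string literal opened by quote q, return the rest of the line
def skipLit (q : Char) : List Char → List Char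
  | [] => []
  | c :: rest =>
    if c = '\\' then skipLit q rest.tail
    else if c = q then rest
    else skipLit q rest
termination_by cs => cs.length
decreasing_by
  all_goals simp [List.length_tail]

-- termination measure for the outer loop: skipping a literal never lengthens the rest
theorem skipLit_length_le (q : Char) (cs : List Char) : (skipLit q cs).length ≤ cs.length := by
  match cs with
  | [] => simp [skipLit]
  | c :: rest =>
    rw [skipLit]
    split
    · have h1 := skipLit_length_le q rest.tail
      simp only [List.length_cons, List.length_tail] at *; omega
    · split
      · simp
      · have := skipLit_length_le q rest; simp; omega
termination_by cs.length
decreasing_by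
  all_goals simp [List.length_tail]

-- outer cursor loop
def bLoop : List Char → Int → Bool → Int × Bool
  | [], d, hob => (d, hob)
  | c :: rest, d, hob =>
    if c = '"' ∨ c = '\'' then bLoop (skipLit c rest) d hob
    else if c = '[' then bLoop rest (d + 1) true
    else if c = ']' then bLoop rest (d - 1) hob
    else bLoop rest d hob
termination_by cs => cs.length
decreasing_by
  · have := skipLit_length_le c rest; simp; omega
  all_goals simp

def count_square_bracket_delta_py_alt (line : String) : Int × Bool :=
  bLoop line.toList 0 false

-- ===== PRECONDITION & SPEC =====
def Spec_count_square_bracket_delta_py (line : String) (out : Int × Bool) : Prop := out = count_square_bracket_delta_py_alt line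
instance (line : String) (out : Int × Bool) : Decidable (Spec_count_square_bracket_delta_py line out) := by unfold Spec_count_square_bracket_delta_py; infer_instance

-- ===== CLAIM (what is proved, stated in full; the proofs are below) =====
def Claim_equal_count_square_bracket_delta_py : Prop := ∀ (line : String), Dom_count_square_bracket_delta_py line → Spec_count_square_bracket_delta_py line (count_square_bracket_delta_py line)

-- ===== LEMMAS AND PROOFS =====

-- result projection of A's loop state
def gSt (s : Int × Bool × Option Char × Bool) : Int × Bool := (s.1, s.2.1)

-- inside a string literal, A's flag machine and B's skipLit cursor agree
theorem skip_eq (q : Char) (cs : List Char) (d : Int) (hob : Bool) :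
    gSt (cs.foldl aStep (d, hob, some q, false)) =
    gSt ((skipLit q cs).foldl aStep (d, hob, none, false)) := by
  match cs with
  | [] => simp [skipLit, gSt]
  | c :: rest =>
    by_cases hc : c = '\\'
    · subst hc
      match rest with
      | [] => simp [skipLit, aStep, gSt]
      | x :: xs =>
        have ih := skip_eq q xs d hob
        simp only [List.foldl_cons, skipLit, List.tail_cons, aStep] at *
        simpa [aStep] using ih
    · by_cases hq : c = q
      · subst hq; simp [skipLit, aStep, hc]
      · have ih := skip_eq q rest d hob
        simp only [List.foldl_cons, skipLit, aStep]
        simpa [hc, hq] using ih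
termination_by cs.length
decreasing_by all_goals simp <;> omega

-- the whole loops agree
theorem main_eq (cs : List Char) (d : Int) (hob : Bool) :
    gSt (cs.foldl aStep (d, hob, none, false)) = bLoop cs d hob := by
  match cs with
  | [] => simp [bLoop, gSt]
  | c :: rest =>
    by_cases hq : c = '"' ∨ c = '\''
    · have h1 := skip_eq c rest d hob
      have h2 := main_eq (skipLit c rest) d hob
      simp only [List.foldl_cons, bLoop, aStep, if_pos hq]
      rw [h1, h2]
    · by_cases h1 : c = '['
      · have ih := main_eq rest (d + 1) true
        simp only [List.foldl_cons, bLoop, aStep]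
        simp [hq, h1] at *
        exact ih
      · by_cases h2 : c = ']'
        · have ih := main_eq rest (d - 1) hob
          simp only [List.foldl_cons, bLoop, aStep]
          simp [hq, h1, h2] at *
          exact ih
        · have ih := main_eq rest d hob
          simp only [List.foldl_cons, bLoop, aStep]
          simp [hq, h1, h2] at *
          exact ih
termination_by cs.length
decreasing_by
  · have := skipLit_length_le c rest; simp; omega
  all_goals simp

-- ===== VERDICT (by name: the statement is the Claim_ definition above) =====
theorem count_square_bracket_delta_py_spec : Claim_equal_count_square_bracket_delta_py := by
  intro line _
  unfold Spec_count_square_bracket_delta_py count_square_bracket_delta_py count_square_bracket_delta_py_alt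
  simpa [gSt] using main_eq line.toList 0 false
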